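-- pv_equiv track=rewrite | github.com/raghavendramorisetty/Python-Programs-Files | Programs/Practice/Techgigproblem2.py | find_max_pair_count
-- ===== SOURCE A (Python) =====
-- def find_max_pair_count(lst):
--     N = len(lst)
--     sums = []
--     pair_count = []
--
--     # Create dictionary from list
--     dictobj = {i: lst[i] for i in range(N)}
--
--     # Collect unique pair sums
--     for i in range(N):
--         for j in range(i + 1, N):
--             pair_sum = lst[i] + lst[j]
--             if pair_sum not in sums:
--                 sums.append(pair_sum)
--
--     sums_sorted = sorted(sums)
--
--     # Iterate over sorted unique sums
--     for target_sum in sums_sorted: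
--         count = 0
--         used_keys = set()  # To track used keys
--
--         # Check pairs to match the current target sum
--         for i in range(N):
--             if i in used_keys:
--                 continue
--             for j in range(i + 1, N):
--                 if j in used_keys:
--                     continue
--                 if dictobj[i] + dictobj[j] == target_sum:
--                     count += 1
--                     used_keys.add(i)
--                     used_keys.add(j)
--                     break
--
--         pair_count.append(count)
--
--     return max(pair_count)
-- ===== SOURCE B (Python) =====
-- def find_max_pair_count(lst):
--     # Count value frequencies once; for each achievable pair-sum, the maximum
--     # number of disjoint pairs is sum over value classes of min(freq) / freq//2.
--     freq = {}
--     for x in lst: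
--         freq[x] = freq.get(x, 0) + 1
--     sums = set()
--     for a in freq:
--         for b in freq:
--             if a < b or (a == b and freq[a] > 1):
--                 sums.add(a + b)
--     best = 0
--     for s in sums:
--         tot = 0
--         for a, ca in freq.items():
--             b = s - a
--             if a < b:
--                 tot += min(ca, freq.get(b, 0))
--             elif a == b:
--                 tot += ca // 2
--         if tot > best:
--             best = tot
--     return best
-- ===== Notes on version B (the rewrite author's own statement) =====
-- stated objective: faster
-- what changed: A collects pair sums with an O(N^2)-membership list and then, per sum, greedily re-pairs indices with nested scans (O(N^4) overall); B builds one value-frequency dictionary and computes each sum's count in closed form as sum of min(freq[a],freq[s-a]) (and freq[s/2]//2), proved equal to A's greedy matching.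
-- outside the precondition, e.g. on find_max_pair_count([]): A raises ValueError, B returns 0
import Mathlib
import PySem

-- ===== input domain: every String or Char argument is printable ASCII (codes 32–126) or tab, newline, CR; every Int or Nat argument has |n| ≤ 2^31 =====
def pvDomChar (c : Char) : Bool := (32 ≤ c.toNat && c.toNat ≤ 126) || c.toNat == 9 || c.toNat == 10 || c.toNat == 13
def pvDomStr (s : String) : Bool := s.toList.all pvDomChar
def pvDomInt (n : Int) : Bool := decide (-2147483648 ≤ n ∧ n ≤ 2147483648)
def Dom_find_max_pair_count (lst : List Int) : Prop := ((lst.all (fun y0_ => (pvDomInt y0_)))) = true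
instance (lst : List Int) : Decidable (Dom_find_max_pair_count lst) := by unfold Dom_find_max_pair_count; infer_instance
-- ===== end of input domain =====

-- B replaces A's per-sum greedy pairing over all index pairs (O(N^4) with the list-membership
-- sums scan) by one frequency table: per pair sum s the count is Σ min(freq a, freq (s-a)) (+ freq(s/2)//2),
-- an asymptotically faster computation proved to equal A's greedy result.

-- ===== PORT A =====
-- inner 'for j in range(i+1, N)' loop: runs to the first matching unused j ('break'), else falls through
def pvFindJ (dictobj : PySem.Dict Int Int) (target_sum i : Int) (used_keys : PySem.Set Int) :
    List Int → Option Int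
  | [] => none
  | j :: js =>
    if j ∈ used_keys then pvFindJ dictobj target_sum i used_keys js
    -- dictobj[i] / dictobj[j]: keys 0..N-1 always present, so the total 'getD' form is exact here
    else if dictobj.getD i 0 + dictobj.getD j 0 = target_sum then some j
    else pvFindJ dictobj target_sum i used_keys js

-- outer 'for i in range(N)' loop of the per-target count, state (count, used_keys)
def pvCountLoop (dictobj : PySem.Dict Int Int) (N target_sum : Int) :
    List Int → Int → PySem.Set Int → Int
  | [], count, _ => count
  | i :: is, count, used_keys =>
    if i ∈ used_keys then pvCountLoop dictobj N target_sum is count used_keys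
    else
      match pvFindJ dictobj target_sum i used_keys (PySem.List.pyRange (i+1) N) with
      | some j => pvCountLoop dictobj N target_sum is (count + 1)
          (PySem.Set.add (PySem.Set.add used_keys i) j)
      | none => pvCountLoop dictobj N target_sum is count used_keys

def find_max_pair_count (lst : List Int) : Int :=
  let N : Int := lst.length
  -- {i: lst[i] for i in range(N)}; lst[i] is always in range here, so 'pyGetD' is exact
  let dictobj : PySem.Dict Int Int :=
    (PySem.List.pyRange 0 N).foldl (fun d i => d.insert i (PySem.List.pyGetD lst i 0)) PySem.Dict.empty
  let sums : List Int :=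
    (PySem.List.pyRange 0 N).foldl (fun acc i =>
      (PySem.List.pyRange (i+1) N).foldl (fun acc j =>
        if (PySem.List.pyGetD lst i 0 + PySem.List.pyGetD lst j 0) ∈ acc then acc
        else acc ++ [PySem.List.pyGetD lst i 0 + PySem.List.pyGetD lst j 0]) acc) []
  let sums_sorted := PySem.List.sorted sums (fun x => x)
  let pair_count : List Int :=
    sums_sorted.foldl (fun pc target_sum =>
      pc ++ [pvCountLoop dictobj N target_sum (PySem.List.pyRange 0 N) 0 PySem.Set.empty]) []
  -- max(pair_count): nonempty under Pre_, so the total 'getD 0' form is exact there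
  (PySem.List.max? pair_count (fun x => x)).getD 0

-- ===== PORT B =====
def find_max_pair_count_alt (lst : List Int) : Int :=
  let freq : PySem.Dict Int Int :=
    lst.foldl (fun d x => d.insert x (d.getD x 0 + 1)) PySem.Dict.empty
  -- {a+b for a in freq for b in freq if a < b or (a == b and freq[a] > 1)}; freq[a]: key present, getD exact
  let sums : PySem.Set Int :=
    freq.keys.foldl (fun s a =>
      freq.keys.foldl (fun s b =>
        if a < b ∨ (a = b ∧ 1 < freq.getD a 0) then PySem.Set.add s (a + b) else s) s)
      PySem.Set.empty
  -- running max over the sums set (order-independent consumption of the set)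
  sums.foldl (fun best s =>
    let tot : Int :=
      freq.items.foldl (fun tot p =>
        if p.1 < s - p.1 then tot + min p.2 (freq.getD (s - p.1) 0)
        else if p.1 = s - p.1 then tot + PySem.Int.floordiv p.2 2
        else tot) 0
    if best < tot then tot else best) 0

-- ===== PRECONDITION & SPEC =====
-- Pre_ excludes lists of fewer than two elements: there A's 'max(pair_count)' is max([]) and raises ValueError.
def Pre_find_max_pair_count (lst : List Int) : Prop := 2 ≤ lst.length
instance (lst : List Int) : Decidable (Pre_find_max_pair_count lst) := by
  unfold Pre_find_max_pair_count; infer_instance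
def pvWitness_find_max_pair_count : List Int := [1, 2]

def Spec_find_max_pair_count (lst : List Int) (out : Int) : Prop := out = find_max_pair_count_alt lst
instance (lst : List Int) (out : Int) : Decidable (Spec_find_max_pair_count lst out) := by
  unfold Spec_find_max_pair_count; infer_instance

-- ===== CLAIM (what is proved, stated in full; the proofs are below) =====
def Claim_equal_find_max_pair_count : Prop := ∀ (lst : List Int), Dom_find_max_pair_count lst →
  Pre_find_max_pair_count lst → Spec_find_max_pair_count lst (find_max_pair_count lst)

-- ===== LEMMAS AND PROOFS =====

-- ---- the common mathematical description (proof layer) ----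

-- number of occurrences, as an Int
def pvCnt (l : List Int) (a : Int) : Int := (l.count a : Int)

-- contribution of value class a to the max number of disjoint pairs of sum s
def pvContrib (s : Int) (l : List Int) (a : Int) : Int :=
  if a < s - a then min (pvCnt l a) (pvCnt l (s - a))
  else if a = s - a then pvCnt l a / 2
  else 0

-- the frequency-based closed form B computes per pair sum
def pvF (s : Int) (l : List Int) : Int := ∑ a ∈ l.toFinset, pvContrib s l a

-- A's greedy pairing, re-expressed as structural recursion on the remaining values
def pvGreedy (s : Int) : List Int → Int
  | [] => 0
  | x :: r => if (s - x) ∈ r then 1 + pvGreedy s (r.erase (s - x)) else pvGreedy s r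
  termination_by l => l.length
  decreasing_by
  · have h := List.length_erase_le (l := r) (a := s - x); simp; omega
  · simp

-- s is the sum of some (ordered) pair of positions of l
def pvAch (l : List Int) (s : Int) : Prop := ∃ a b : Int, a + b = s ∧ [a, b].Sublist l

-- values of the not-yet-used indices among is
def pvRem (lst : List Int) (used : PySem.Set Int) (is : List Int) : List Int :=
  (is.filter (fun i => decide (i ∉ used))).map (fun i => PySem.List.pyGetD lst i 0)

theorem pvCnt_nonneg (l : List Int) (a : Int) : 0 ≤ pvCnt l a := by simp [pvCnt]

theorem pvCnt_pos_of_mem {l : List Int} {a : Int} (h : a ∈ l) : 1 ≤ pvCnt l a := by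
  simpa [pvCnt] using List.count_pos_iff.mpr h

theorem pvCnt_cons (x : Int) (r : List Int) (a : Int) :
    pvCnt (x :: r) a = pvCnt r a + if a = x then 1 else 0 := by
  by_cases h : a = x
  · subst h; simp [pvCnt]
  · have h2 : ¬ (x = a) := fun hc => h hc.symm
    simp [pvCnt, h, h2]

theorem pvCnt_cons_ne (x : Int) (r : List Int) {a : Int} (h : a ≠ x) :
    pvCnt (x :: r) a = pvCnt r a := by
  rw [pvCnt_cons]; simp [h]

theorem pvCnt_erase_self {r : List Int} {b : Int} (h : b ∈ r) :
    pvCnt (r.erase b) b = pvCnt r b - 1 := by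
  have h1 := pvCnt_pos_of_mem h
  simp only [pvCnt, List.count_erase_self]
  have : 1 ≤ r.count b := by simpa [pvCnt] using h1
  omega

theorem pvCnt_erase_ne (r : List Int) {a b : Int} (h : a ≠ b) :
    pvCnt (r.erase b) a = pvCnt r a := by
  simp [pvCnt, List.count_erase_of_ne h]

theorem pvContrib_nonneg (s : Int) (l : List Int) (a : Int) : 0 ≤ pvContrib s l a := by
  have h1 := pvCnt_nonneg l a
  have h2 := pvCnt_nonneg l (s - a)
  unfold pvContrib; split_ifs <;> omega

theorem pvContrib_of_count_eq_zero (s : Int) (l : List Int) (a : Int)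
    (h : l.count a = 0) : pvContrib s l a = 0 := by
  have h2 := pvCnt_nonneg l (s - a)
  have h1 : pvCnt l a = 0 := by simp [pvCnt, h]
  unfold pvContrib; split_ifs <;> omega

theorem pvContrib_congr {s : Int} {l1 l2 : List Int} {a : Int}
    (h1 : pvCnt l1 a = pvCnt l2 a) (h2 : pvCnt l1 (s - a) = pvCnt l2 (s - a)) :
    pvContrib s l1 a = pvContrib s l2 a := by
  unfold pvContrib; rw [h1, h2]

theorem pvF_eq_sum (s : Int) (l : List Int) (U : Finset Int) (h : l.toFinset ⊆ U) :
    pvF s l = ∑ a ∈ U, pvContrib s l a := by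
  unfold pvF
  refine Finset.sum_subset h ?_
  intro x _ hx
  refine pvContrib_of_count_eq_zero s l x (List.count_eq_zero.mpr ?_)
  simpa using hx

theorem pvSum_split_one (U : Finset Int) (f g : Int → Int) (x d : Int) (hx : x ∈ U)
    (hc : ∀ a ∈ U, a ≠ x → f a = g a) (hpt : f x = d + g x) :
    ∑ a ∈ U, f a = d + ∑ a ∈ U, g a := by
  rw [← Finset.add_sum_erase U f hx, ← Finset.add_sum_erase U g hx]
  have hS : ∑ a ∈ U.erase x, f a = ∑ a ∈ U.erase x, g a := by
    refine Finset.sum_congr rfl ?_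
    intro a ha
    rcases Finset.mem_erase.mp ha with ⟨hne, haU⟩
    exact hc a haU hne
  omega

theorem pvSum_split_two (U : Finset Int) (f g : Int → Int) (x y : Int)
    (hx : x ∈ U) (hy : y ∈ U) (hxy : x ≠ y)
    (hc : ∀ a ∈ U, a ≠ x → a ≠ y → f a = g a)
    (hpt : f x + f y = 1 + (g x + g y)) :
    ∑ a ∈ U, f a = 1 + ∑ a ∈ U, g a := by
  have hy' : y ∈ U.erase x := Finset.mem_erase.mpr ⟨Ne.symm hxy, hy⟩
  rw [← Finset.add_sum_erase U f hx, ← Finset.add_sum_erase U g hx,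
      ← Finset.add_sum_erase _ f hy', ← Finset.add_sum_erase _ g hy']
  have hS : ∑ a ∈ (U.erase x).erase y, f a = ∑ a ∈ (U.erase x).erase y, g a := by
    refine Finset.sum_congr rfl ?_
    intro a ha
    rcases Finset.mem_erase.mp ha with ⟨hney, ha2⟩
    rcases Finset.mem_erase.mp ha2 with ⟨hnex, haU⟩
    exact hc a haU hnex hney
  omega

theorem pvF_cons_of_mem (s x : Int) (r : List Int) (h : (s - x) ∈ r) :
    pvF s (x :: r) = 1 + pvF s (r.erase (s - x)) := by
  set y := s - x with hy
  set U : Finset Int := insert x (insert y r.toFinset) with hU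
  have hxU : x ∈ U := Finset.mem_insert_self _ _
  have hyU : y ∈ U := Finset.mem_insert_of_mem (Finset.mem_insert_self _ _)
  have hsub1 : (x :: r).toFinset ⊆ U := by
    intro a ha; simp only [List.toFinset_cons, Finset.mem_insert, List.mem_toFinset] at ha
    simp only [hU, Finset.mem_insert, List.mem_toFinset]; tauto
  have hsub2 : (r.erase y).toFinset ⊆ U := by
    intro a ha; simp only [List.mem_toFinset] at ha
    have : a ∈ r := List.mem_of_mem_erase ha
    simp only [hU, Finset.mem_insert, List.mem_toFinset]; tauto
  rw [pvF_eq_sum s _ U hsub1, pvF_eq_sum s _ U hsub2]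
  have hsy : s - y = x := by omega
  have hB : 1 ≤ pvCnt r y := pvCnt_pos_of_mem h
  by_cases hxy : x = y
  · -- x is its own partner: s = 2x
    refine pvSum_split_one U _ _ x 1 hxU ?_ ?_
    · intro a haU hax
      have hay : a ≠ y := by rw [← hxy]; exact hax
      refine pvContrib_congr ?_ ?_
      · rw [pvCnt_cons_ne x r hax, pvCnt_erase_ne r hay]
      · have hsa : s - a ≠ x := by intro hc; apply hax; omega
        have hsay : s - a ≠ y := by rw [← hxy]; exact hsa
        rw [pvCnt_cons_ne x r hsa, pvCnt_erase_ne r hsay]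
    · have hxx : x = s - x := by omega
      have e1 : pvCnt (x :: r) x = pvCnt r x + 1 := by rw [pvCnt_cons]; simp
      have e4 : pvCnt (r.erase y) x = pvCnt r x - 1 := by
        rw [← hxy]; exact pvCnt_erase_self (by rw [hxy]; exact h)
      have hcx : 1 ≤ pvCnt r x := by rw [hxy]; exact hB
      unfold pvContrib
      rw [if_neg (by omega : ¬ x < s - x), if_pos hxx, if_neg (by omega : ¬ x < s - x),
          if_pos hxx, e1, e4]
      omega
  · refine pvSum_split_two U _ _ x y hxU hyU hxy ?_ ?_
    · intro a haU hax hay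
      refine pvContrib_congr ?_ ?_
      · rw [pvCnt_cons_ne x r hax, pvCnt_erase_ne r hay]
      · have h1 : s - a ≠ x := by intro hc; apply hay; omega
        have h2 : s - a ≠ y := by intro hc; apply hax; omega
        rw [pvCnt_cons_ne x r h1, pvCnt_erase_ne r h2]
    · have e1 : pvCnt (x :: r) x = pvCnt r x + 1 := by rw [pvCnt_cons]; simp
      have e2 : pvCnt (x :: r) y = pvCnt r y := pvCnt_cons_ne x r (Ne.symm hxy)
      have e3 : pvCnt (r.erase y) x = pvCnt r x := pvCnt_erase_ne r hxy
      have e4 : pvCnt (r.erase y) y = pvCnt r y - 1 := pvCnt_erase_self h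
      unfold pvContrib
      rw [hsy, ← hy, e1, e2, e3, e4]
      have hA := pvCnt_nonneg r x
      have hxyne : x ≠ y := hxy
      split_ifs <;> omega

theorem pvF_cons_of_not_mem (s x : Int) (r : List Int) (h : (s - x) ∉ r) :
    pvF s (x :: r) = pvF s r := by
  set y := s - x with hy
  set U : Finset Int := insert x (insert y r.toFinset) with hU
  have hxU : x ∈ U := Finset.mem_insert_self _ _
  have hsub1 : (x :: r).toFinset ⊆ U := by
    intro a ha; simp only [List.toFinset_cons, Finset.mem_insert, List.mem_toFinset] at ha
    simp only [hU, Finset.mem_insert, List.mem_toFinset]; tauto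
  have hsub2 : r.toFinset ⊆ U := by
    intro a ha; simp only [List.mem_toFinset] at ha
    simp only [hU, Finset.mem_insert, List.mem_toFinset]; tauto
  rw [pvF_eq_sum s _ U hsub1, pvF_eq_sum s _ U hsub2]
  have hB : pvCnt r y = 0 := by
    simp only [pvCnt, List.count_eq_zero.mpr h, Nat.cast_zero]
  have hmain : ∑ a ∈ U, pvContrib s (x :: r) a = 0 + ∑ a ∈ U, pvContrib s r a := by
    refine pvSum_split_one U _ _ x 0 hxU ?_ ?_
    · intro a haU hax
      by_cases hay : a = y
      · subst hay
        have hyx : y ≠ x := hax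
        have c1 : List.count y (x :: r) = 0 := by
          refine List.count_eq_zero.mpr ?_
          simp only [List.mem_cons, not_or]
          exact ⟨hyx, h⟩
        have c2 : List.count y r = 0 := List.count_eq_zero.mpr h
        rw [pvContrib_of_count_eq_zero s _ y c1, pvContrib_of_count_eq_zero s _ y c2]
      · refine pvContrib_congr (pvCnt_cons_ne x r hax) ?_
        have h1 : s - a ≠ x := by intro hc; apply hay; omega
        rw [pvCnt_cons_ne x r h1]
    · by_cases hxy : x = y
      · have hrx : pvCnt r x = 0 := by rw [hxy]; exact hB
        have hxx : x = s - x := by omega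
        have e1 : pvCnt (x :: r) x = pvCnt r x + 1 := by rw [pvCnt_cons]; simp
        unfold pvContrib
        rw [if_neg (by omega : ¬ x < s - x), if_pos hxx, if_neg (by omega : ¬ x < s - x),
            if_pos hxx, e1, hrx]
        omega
      · have e1 : pvCnt (x :: r) x = pvCnt r x + 1 := by rw [pvCnt_cons]; simp
        have e2 : pvCnt (x :: r) (s - x) = pvCnt r (s - x) := by
          refine pvCnt_cons_ne x r ?_
          rw [← hy]; exact fun hc => hxy hc.symm
        have hA := pvCnt_nonneg r x
        have hB' : pvCnt r (s - x) = 0 := by rw [← hy]; exact hB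
        unfold pvContrib
        rw [e1, e2, hB']
        split_ifs <;> omega
  omega

theorem pvGreedy_eq_F (s : Int) (l : List Int) : pvGreedy s l = pvF s l := by
  induction hn : l.length using Nat.strong_induction_on generalizing l with
  | _ n IH =>
    match l, hn with
    | [], _ => simp [pvGreedy, pvF]
    | x :: r, hn =>
      by_cases h : (s - x) ∈ r
      · have hlen : (r.erase (s - x)).length < n := by
          have := List.length_erase_le (l := r) (a := s - x)
          simp at hn; omega
        rw [pvGreedy, if_pos h, pvF_cons_of_mem s x r h, IH _ hlen _ rfl]
      · have hlen : r.length < n := by simp at hn; omega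
        rw [pvGreedy, if_neg h, pvF_cons_of_not_mem s x r h, IH _ hlen _ rfl]

theorem pvRem_nil (lst : List Int) (used : PySem.Set Int) : pvRem lst used [] = [] := rfl

theorem pvRem_cons_mem (lst : List Int) (used : PySem.Set Int) (j : Int) (js : List Int)
    (h : j ∈ used) : pvRem lst used (j :: js) = pvRem lst used js := by
  simp [pvRem, h]

theorem pvRem_cons_not_mem (lst : List Int) (used : PySem.Set Int) (j : Int) (js : List Int)
    (h : j ∉ used) :
    pvRem lst used (j :: js) = PySem.List.pyGetD lst j 0 :: pvRem lst used js := by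
  simp [pvRem, h]

theorem pvRem_congr (lst : List Int) {u1 u2 : PySem.Set Int} (js : List Int)
    (h : ∀ k ∈ js, k ∈ u1 ↔ k ∈ u2) : pvRem lst u1 js = pvRem lst u2 js := by
  unfold pvRem
  congr 1
  refine List.filter_congr ?_
  intro k hk
  simp only [decide_eq_decide]
  exact not_congr (h k hk)

theorem pvFindJ_spec (lst : List Int) (d : PySem.Dict Int Int) (t i : Int) :
    ∀ (js : List Int) (used : PySem.Set Int), js.Nodup →
      (∀ j ∈ js, d.getD j 0 = PySem.List.pyGetD lst j 0) →
      (pvFindJ d t i used js = none → (t - d.getD i 0) ∉ pvRem lst used js) ∧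
      (∀ j, pvFindJ d t i used js = some j → j ∈ js ∧ j ∉ used ∧
        (t - d.getD i 0) ∈ pvRem lst used js ∧
        pvRem lst (PySem.Set.add used j) js = (pvRem lst used js).erase (t - d.getD i 0)) := by
  intro js
  induction js with
  | nil =>
    intro used _ _
    constructor
    · intro _; simp [pvRem_nil]
    · intro j h; simp [pvFindJ] at h
  | cons j0 rest IH =>
    intro used hnd hval
    have hnd' : rest.Nodup := hnd.of_cons
    have hj0rest : j0 ∉ rest := by simp at hnd; tauto
    have hval' : ∀ j ∈ rest, d.getD j 0 = PySem.List.pyGetD lst j 0 := by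
      intro j hj; exact hval j (List.mem_cons_of_mem _ hj)
    have hvj0 : d.getD j0 0 = PySem.List.pyGetD lst j0 0 := hval j0 (List.mem_cons_self)
    by_cases hu : j0 ∈ used
    · -- skipped: j0 already used
      have heq : pvFindJ d t i used (j0 :: rest) = pvFindJ d t i used rest := by
        rw [pvFindJ, if_pos hu]
      obtain ⟨IH1, IH2⟩ := IH used hnd' hval'
      constructor
      · intro hnone
        rw [pvRem_cons_mem lst used j0 rest hu]
        exact IH1 (heq ▸ hnone)
      · intro j hsome
        obtain ⟨h1, h2, h3, h4⟩ := IH2 j (heq ▸ hsome)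
        refine ⟨List.mem_cons_of_mem _ h1, h2, ?_, ?_⟩
        · rw [pvRem_cons_mem lst used j0 rest hu]; exact h3
        · rw [pvRem_cons_mem lst used j0 rest hu,
              pvRem_cons_mem lst _ j0 rest (by simp [PySem.Set.mem_add]; tauto)]
          exact h4
    · by_cases hm : d.getD i 0 + d.getD j0 0 = t
      · -- match found at j0
        have heq : pvFindJ d t i used (j0 :: rest) = some j0 := by
          rw [pvFindJ, if_neg hu, if_pos hm]
        constructor
        · intro hnone; rw [heq] at hnone; cases hnone
        · intro j hsome
          rw [heq] at hsome
          injection hsome with hj; subst hj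
          have hvv : PySem.List.pyGetD lst j0 0 = t - d.getD i 0 := by rw [← hvj0]; omega
          refine ⟨List.mem_cons_self, hu, ?_, ?_⟩
          · rw [pvRem_cons_not_mem lst used j0 rest hu, hvv]; exact List.mem_cons_self
          · rw [pvRem_cons_not_mem lst used j0 rest hu,
                pvRem_cons_mem lst _ j0 rest (by simp [PySem.Set.mem_add])]
            rw [hvv, List.erase_cons_head]
            exact pvRem_congr lst rest (fun k hk => by
              simp [PySem.Set.mem_add]
              intro hkj0; exact absurd (hkj0 ▸ hk) hj0rest)
      · -- no match at j0: recurse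
        have heq : pvFindJ d t i used (j0 :: rest) = pvFindJ d t i used rest := by
          rw [pvFindJ, if_neg hu, if_neg hm]
        have hvne : PySem.List.pyGetD lst j0 0 ≠ t - d.getD i 0 := by rw [← hvj0]; omega
        obtain ⟨IH1, IH2⟩ := IH used hnd' hval'
        constructor
        · intro hnone
          rw [pvRem_cons_not_mem lst used j0 rest hu]
          simp only [List.mem_cons, not_or]
          exact ⟨fun hc => hvne hc.symm, IH1 (heq ▸ hnone)⟩
        · intro j hsome
          obtain ⟨h1, h2, h3, h4⟩ := IH2 j (heq ▸ hsome)
          have hjne : j0 ≠ j := fun hc => hj0rest (hc ▸ h1)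
          refine ⟨List.mem_cons_of_mem _ h1, h2, ?_, ?_⟩
          · rw [pvRem_cons_not_mem lst used j0 rest hu]
            exact List.mem_cons_of_mem _ h3
          · rw [pvRem_cons_not_mem lst used j0 rest hu,
                pvRem_cons_not_mem lst _ j0 rest (by simp [PySem.Set.mem_add]; exact ⟨hu, hjne⟩)]
            rw [List.erase_cons_tail (by simpa using fun hc => hvne hc)]
            rw [h4]

theorem pvCountLoop_spec (lst : List Int) (d : PySem.Dict Int Int) (N t : Int)
    (hN : N = (lst.length : Int))
    (hd : ∀ j : Int, 0 ≤ j → j < N → d.getD j 0 = PySem.List.pyGetD lst j 0) :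
    ∀ (k : Nat) (a count : Int) (used : PySem.Set Int), 0 ≤ a → (N - a).toNat = k →
      pvCountLoop d N t (PySem.List.pyRange a N) count used =
        count + pvGreedy t (pvRem lst used (PySem.List.pyRange a N)) := by
  intro k
  induction k with
  | zero =>
    intro a count used ha hk
    have hNa : N ≤ a := by omega
    rw [PySem.List.pyRange_one_eq_nil hNa]
    simp [pvCountLoop, pvRem_nil, pvGreedy]
  | succ k IH =>
    intro a count used ha hk
    have haN : a < N := by omega
    rw [PySem.List.pyRange_one_cons haN]
    by_cases hmem : a ∈ used
    · rw [pvCountLoop, if_pos hmem, pvRem_cons_mem lst used a _ hmem]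
      exact IH (a+1) count used (by omega) (by omega)
    · have hval' : ∀ j ∈ PySem.List.pyRange (a+1) N, d.getD j 0 = PySem.List.pyGetD lst j 0 := by
        intro j hj
        rw [PySem.List.mem_pyRange_one] at hj
        exact hd j (by omega) (by omega)
      have hnd : (PySem.List.pyRange (a+1) N).Nodup := PySem.List.nodup_pyRange_one _ _
      have hda : d.getD a 0 = PySem.List.pyGetD lst a 0 := hd a ha haN
      have hanotin : a ∉ PySem.List.pyRange (a+1) N := by
        rw [PySem.List.mem_pyRange_one]; omega
      obtain ⟨hspec1, hspec2⟩ := pvFindJ_spec lst d t a (PySem.List.pyRange (a+1) N) used hnd hval'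
      cases hfj : pvFindJ d t a used (PySem.List.pyRange (a+1) N) with
      | none =>
        rw [pvCountLoop, if_neg hmem, hfj]
        dsimp only
        have hnm := hspec1 hfj
        rw [hda] at hnm
        rw [pvRem_cons_not_mem lst used a _ hmem, pvGreedy, if_neg hnm]
        exact IH (a+1) count used (by omega) (by omega)
      | some j =>
        obtain ⟨hjmem, hjused, htv, herase⟩ := hspec2 j hfj
        rw [hda] at htv herase
        rw [pvCountLoop, if_neg hmem, hfj]
        dsimp only
        rw [pvRem_cons_not_mem lst used a _ hmem, pvGreedy, if_pos htv]
        rw [IH (a+1) (count+1) (PySem.Set.add (PySem.Set.add used a) j) (by omega) (by omega)]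
        have hcongr : pvRem lst (PySem.Set.add (PySem.Set.add used a) j) (PySem.List.pyRange (a+1) N) =
            pvRem lst (PySem.Set.add used j) (PySem.List.pyRange (a+1) N) := by
          refine pvRem_congr lst _ ?_
          intro kk hkk
          simp only [PySem.Set.mem_add]
          constructor
          · rintro ((h | rfl) | rfl)
            · exact Or.inl h
            · exact absurd hkk hanotin
            · exact Or.inr rfl
          · rintro (h | rfl)
            · exact Or.inl (Or.inl h)
            · exact Or.inr rfl
        rw [hcongr, herase]
        ring

theorem pvGetD_foldl_insert_not_mem (ks : List Int) (f : Int → Int) (d : PySem.Dict Int Int)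
    (k : Int) (hk : k ∉ ks) :
    (ks.foldl (fun d i => d.insert i (f i)) d).getD k 0 = d.getD k 0 := by
  induction ks generalizing d with
  | nil => rfl
  | cons a as IH =>
    simp only [List.foldl_cons]
    have h1 : k ∉ as := fun hc => hk (List.mem_cons_of_mem _ hc)
    have h2 : k ≠ a := fun hc => hk (hc ▸ List.mem_cons_self)
    rw [IH _ h1, PySem.Dict.getD_insert_of_ne d _ _ h2]

theorem pvGetD_foldl_insert_mem (ks : List Int) (f : Int → Int) (k : Int) :
    ∀ (d : PySem.Dict Int Int), k ∈ ks → ks.Nodup →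
    (ks.foldl (fun d i => d.insert i (f i)) d).getD k 0 = f k := by
  induction ks with
  | nil => intro d hk _; cases hk
  | cons a as IH =>
    intro d hk hnd
    simp only [List.foldl_cons]
    rcases List.mem_cons.mp hk with rfl | h
    · rw [pvGetD_foldl_insert_not_mem as f _ k (by simp at hnd; tauto)]
      rw [PySem.Dict.getD_insert]
      simp
    · exact IH _ h hnd.of_cons

theorem pvMem_inner_fold (f : Int → Int) :
    ∀ (js : List Int) (acc : List Int) (x : Int),
      (x ∈ js.foldl (fun acc j => if f j ∈ acc then acc else acc ++ [f j]) acc ↔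
        x ∈ acc ∨ ∃ j ∈ js, f j = x) := by
  intro js
  induction js with
  | nil => simp
  | cons j0 js IH =>
    intro acc x
    simp only [List.foldl_cons]
    by_cases h : f j0 ∈ acc
    · rw [if_pos h, IH]
      constructor
      · rintro (hx | ⟨j, hj, rfl⟩)
        · exact Or.inl hx
        · exact Or.inr ⟨j, List.mem_cons_of_mem _ hj, rfl⟩
      · rintro (hx | ⟨j, hj, rfl⟩)
        · exact Or.inl hx
        · rcases List.mem_cons.mp hj with rfl | hj'
          · exact Or.inl h
          · exact Or.inr ⟨j, hj', rfl⟩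
    · rw [if_neg h, IH]
      simp only [List.mem_append, List.mem_cons, List.not_mem_nil, or_false]
      constructor
      · rintro ((hx | rfl) | ⟨j, hj, rfl⟩)
        · exact Or.inl hx
        · exact Or.inr ⟨j0, Or.inl rfl, rfl⟩
        · exact Or.inr ⟨j, Or.inr hj, rfl⟩
      · rintro (hx | ⟨j, (rfl | hj), rfl⟩)
        · exact Or.inl (Or.inl hx)
        · exact Or.inl (Or.inr rfl)
        · exact Or.inr ⟨j, hj, rfl⟩

theorem pvMem_outer_fold (f : Int → Int → Int) (g : Int → List Int) :
    ∀ (is : List Int) (acc : List Int) (x : Int),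
      (x ∈ is.foldl (fun acc i => (g i).foldl
          (fun acc j => if f i j ∈ acc then acc else acc ++ [f i j]) acc) acc ↔
        x ∈ acc ∨ ∃ i ∈ is, ∃ j ∈ g i, f i j = x) := by
  intro is
  induction is with
  | nil => simp
  | cons i0 is IH =>
    intro acc x
    simp only [List.foldl_cons]
    rw [IH, pvMem_inner_fold]
    constructor
    · rintro ((hx | ⟨j, hj, rfl⟩) | ⟨i, hi, j, hj, rfl⟩)
      · exact Or.inl hx
      · exact Or.inr ⟨i0, List.mem_cons_self, j, hj, rfl⟩
      · exact Or.inr ⟨i, List.mem_cons_of_mem _ hi, j, hj, rfl⟩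
    · rintro (hx | ⟨i, hi, j, hj, rfl⟩)
      · exact Or.inl (Or.inl hx)
      · rcases List.mem_cons.mp hi with rfl | hi'
        · exact Or.inl (Or.inr ⟨j, hj, rfl⟩)
        · exact Or.inr ⟨i, hi', j, hj, rfl⟩

theorem pvPair_sublist_of_getD : ∀ (l : List Int) (i j : Nat), i < j → j < l.length →
    [l.getD i 0, l.getD j 0].Sublist l := by
  intro l
  induction l with
  | nil => intro i j h1 h2; simp at h2
  | cons x r IH =>
    intro i j h1 h2
    cases i with
    | zero =>
      cases j with
      | zero => omega
      | succ j' =>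
        simp only [List.getD_cons_zero, List.getD_cons_succ]
        refine List.Sublist.cons₂ x (List.singleton_sublist.mpr ?_)
        have hj : j' < r.length := by simp at h2; omega
        rw [List.getD_eq_getElem r 0 hj]
        exact List.getElem_mem hj
    | succ i' =>
      cases j with
      | zero => omega
      | succ j' =>
        simp only [List.getD_cons_succ]
        exact (IH i' j' (by omega) (by simp at h2; omega)).cons x

theorem pvExists_getD_of_pair_sublist : ∀ (l : List Int) (a b : Int), [a, b].Sublist l →
    ∃ i j : Nat, i < j ∧ j < l.length ∧ l.getD i 0 = a ∧ l.getD j 0 = b := by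
  intro l
  induction l with
  | nil => intro a b h; exact absurd (List.eq_nil_of_sublist_nil h) (by simp)
  | cons x r IH =>
    intro a b h
    rcases List.sublist_cons_iff.mp h with h' | ⟨t, ht, hsub⟩
    · obtain ⟨i, j, h1, h2, h3, h4⟩ := IH a b h'
      refine ⟨i+1, j+1, by omega, ?_, ?_, ?_⟩
      · simp only [List.length_cons]; omega
      · simpa using h3
      · simpa using h4
    · simp only [List.cons.injEq] at ht
      obtain ⟨ha, htb⟩ := ht
      subst htb
      have hb : b ∈ r := List.singleton_sublist.mp hsub
      obtain ⟨n, hn, he⟩ := List.mem_iff_getElem.mp hb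
      refine ⟨0, n+1, by omega, by simp; omega, by simp [ha], ?_⟩
      simp only [List.getD_cons_succ]
      rw [List.getD_eq_getElem r 0 hn, he]

theorem pvPair_sublist_of_mem_ne : ∀ (l : List Int) (a b : Int), a ∈ l → b ∈ l → a ≠ b →
    [a, b].Sublist l ∨ [b, a].Sublist l := by
  intro l
  induction l with
  | nil => intro a b ha; cases ha
  | cons x r IH =>
    intro a b ha hb hne
    rcases List.mem_cons.mp ha with rfl | ha'
    · have hb' : b ∈ r := by
        rcases List.mem_cons.mp hb with rfl | h
        · exact absurd rfl hne
        · exact h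
      exact Or.inl (List.Sublist.cons₂ _ (List.singleton_sublist.mpr hb'))
    · rcases List.mem_cons.mp hb with rfl | hb'
      · exact Or.inr (List.Sublist.cons₂ _ (List.singleton_sublist.mpr ha'))
      · rcases IH a b ha' hb' hne with h | h
        · exact Or.inl (h.cons x)
        · exact Or.inr (h.cons x)

theorem pvAch_iff_values (l : List Int) (s : Int) :
    pvAch l s ↔ ∃ a ∈ l, ∃ b ∈ l, a + b = s ∧ (a < b ∨ (a = b ∧ 2 ≤ l.count a)) := by
  constructor
  · rintro ⟨a, b, hsum, hsub⟩
    have ha : a ∈ l := hsub.subset (by simp)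
    have hb : b ∈ l := hsub.subset (by simp)
    rcases lt_trichotomy a b with h | h | h
    · exact ⟨a, ha, b, hb, hsum, Or.inl h⟩
    · subst h
      have : 2 ≤ l.count a := List.duplicate_iff_two_le_count.mp (List.duplicate_iff_sublist.mpr hsub)
      exact ⟨a, ha, a, ha, hsum, Or.inr ⟨rfl, this⟩⟩
    · exact ⟨b, hb, a, ha, by omega, Or.inl h⟩
  · rintro ⟨a, ha, b, hb, hsum, hc | ⟨rfl, hc⟩⟩
    · rcases pvPair_sublist_of_mem_ne l a b ha hb (by omega) with h | h
      · exact ⟨a, b, hsum, h⟩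
      · exact ⟨b, a, by omega, h⟩
    · exact ⟨a, a, hsum, List.duplicate_iff_sublist.mp (List.duplicate_iff_two_le_count.mpr hc)⟩

theorem pvMem_set_inner (P : Int → Int → Prop) [hP : ∀ a b, Decidable (P a b)] (a : Int) :
    ∀ (bs : List Int) (s : PySem.Set Int) (x : Int),
      (x ∈ bs.foldl (fun s b => if P a b then PySem.Set.add s (a + b) else s) s ↔
        x ∈ s ∨ ∃ b ∈ bs, P a b ∧ a + b = x) := by
  intro bs
  induction bs with
  | nil => simp
  | cons b0 bs IH =>
    intro s x
    simp only [List.foldl_cons]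
    by_cases h : P a b0
    · rw [if_pos h, IH]
      simp only [PySem.Set.mem_add, List.mem_cons]
      constructor
      · rintro ((hx | rfl) | ⟨b, hb, hPb, rfl⟩)
        · exact Or.inl hx
        · exact Or.inr ⟨b0, Or.inl rfl, h, rfl⟩
        · exact Or.inr ⟨b, Or.inr hb, hPb, rfl⟩
      · rintro (hx | ⟨b, (rfl | hb), hPb, rfl⟩)
        · exact Or.inl (Or.inl hx)
        · exact Or.inl (Or.inr rfl)
        · exact Or.inr ⟨b, hb, hPb, rfl⟩
    · rw [if_neg h, IH]
      simp only [List.mem_cons]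
      constructor
      · rintro (hx | ⟨b, hb, hPb, rfl⟩)
        · exact Or.inl hx
        · exact Or.inr ⟨b, Or.inr hb, hPb, rfl⟩
      · rintro (hx | ⟨b, (rfl | hb), hPb, rfl⟩)
        · exact Or.inl hx
        · exact absurd hPb h
        · exact Or.inr ⟨b, hb, hPb, rfl⟩

theorem pvMem_set_outer (P : Int → Int → Prop) [hP : ∀ a b, Decidable (P a b)] (ks : List Int) :
    ∀ (as : List Int) (s : PySem.Set Int) (x : Int),
      (x ∈ as.foldl (fun s a => ks.foldl
          (fun s b => if P a b then PySem.Set.add s (a + b) else s) s) s ↔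
        x ∈ s ∨ ∃ a ∈ as, ∃ b ∈ ks, P a b ∧ a + b = x) := by
  intro as
  induction as with
  | nil => simp
  | cons a0 as IH =>
    intro s x
    simp only [List.foldl_cons]
    rw [IH, pvMem_set_inner]
    constructor
    · rintro ((hx | ⟨b, hb, hPb, rfl⟩) | ⟨a, ha, b, hb, hPb, rfl⟩)
      · exact Or.inl hx
      · exact Or.inr ⟨a0, List.mem_cons_self, b, hb, hPb, rfl⟩
      · exact Or.inr ⟨a, List.mem_cons_of_mem _ ha, b, hb, hPb, rfl⟩
    · rintro (hx | ⟨a, ha, b, hb, hPb, rfl⟩)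
      · exact Or.inl (Or.inl hx)
      · rcases List.mem_cons.mp ha with rfl | ha'
        · exact Or.inl (Or.inr ⟨b, hb, hPb, rfl⟩)
        · exact Or.inr ⟨a, ha', b, hb, hPb, rfl⟩

theorem pvRunMax_ge (f : Int → Int) :
    ∀ (l : List Int) (init : Int),
      init ≤ l.foldl (fun best s => if best < f s then f s else best) init ∧
      ∀ s ∈ l, f s ≤ l.foldl (fun best s => if best < f s then f s else best) init := by
  intro l
  induction l with
  | nil => intro init; exact ⟨le_refl _, by simp⟩
  | cons a l IH =>
    intro init
    simp only [List.foldl_cons]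
    obtain ⟨h1, h2⟩ := IH (if init < f a then f a else init)
    constructor
    · refine le_trans ?_ h1
      split_ifs <;> omega
    · intro s hs
      rcases List.mem_cons.mp hs with rfl | hs'
      · refine le_trans ?_ h1
        split_ifs <;> omega
      · exact h2 s hs'

theorem pvRunMax_mem (f : Int → Int) :
    ∀ (l : List Int) (init : Int),
      l.foldl (fun best s => if best < f s then f s else best) init = init ∨
      ∃ s ∈ l, l.foldl (fun best s => if best < f s then f s else best) init = f s := by
  intro l
  induction l with
  | nil => intro init; exact Or.inl rfl
  | cons a l IH =>
    intro init
    simp only [List.foldl_cons]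
    by_cases hc : init < f a
    · rw [if_pos hc]
      rcases IH (f a) with h | ⟨s, hs, h⟩
      · exact Or.inr ⟨a, List.mem_cons_self, h⟩
      · exact Or.inr ⟨s, List.mem_cons_of_mem _ hs, h⟩
    · rw [if_neg hc]
      rcases IH init with h | ⟨s, hs, h⟩
      · exact Or.inl h
      · exact Or.inr ⟨s, List.mem_cons_of_mem _ hs, h⟩

theorem pvF_pos_of_ach (s : Int) (l : List Int) (h : pvAch l s) : 1 ≤ pvF s l := by
  rw [pvAch_iff_values] at h
  obtain ⟨a, ha, b, hb, hsum, hcond⟩ := h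
  have hmem : a ∈ l.toFinset := List.mem_toFinset.mpr ha
  have hle : 1 ≤ pvContrib s l a := by
    rcases hcond with hab | ⟨rfl, hc⟩
    · unfold pvContrib
      rw [if_pos (by omega), (by omega : s - a = b)]
      have h1 := pvCnt_pos_of_mem ha
      have h2 := pvCnt_pos_of_mem hb
      omega
    · unfold pvContrib
      rw [if_neg (by omega), if_pos (by omega)]
      have : (2 : Int) ≤ pvCnt l a := by unfold pvCnt; exact_mod_cast hc
      omega
  calc (1 : Int) ≤ pvContrib s l a := hle
    _ ≤ ∑ x ∈ l.toFinset, pvContrib s l x :=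
        Finset.single_le_sum (fun i _ => pvContrib_nonneg s l i) hmem

theorem pvFloordiv_two (n : Int) : PySem.Int.floordiv n 2 = n / 2 := by
  simp [PySem.Int.floordiv, Int.fdiv_eq_ediv_of_nonneg n (by norm_num : (0:Int) ≤ 2)]

theorem pvTot_eq (lst : List Int) (s : Int) :
    (PySem.Dict.counter lst).items.foldl
      (fun tot p => if p.1 < s - p.1 then tot + min p.2 ((PySem.Dict.counter lst).getD (s - p.1) 0)
        else if p.1 = s - p.1 then tot + PySem.Int.floordiv p.2 2 else tot) 0
      = pvF s lst := by
  rw [PySem.Dict.items_counter, List.foldl_map]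
  dsimp only
  refine Eq.trans (PySem.List.foldl_congr_mem _ _
      (fun (tot : Int) (k : Int) => tot + pvContrib s lst k) _ ?_) ?_
  · intro tot k _
    rw [PySem.Dict.getD_counter, pvFloordiv_two]
    simp only [pvContrib, pvCnt]
    split_ifs <;> omega
  · rw [PySem.List.foldl_add _ (pvContrib s lst), zero_add,
        ← List.sum_toFinset _ (PySem.Set.nodup_ofList lst)]
    refine Finset.sum_congr ?_ (fun _ _ => rfl)
    ext a
    simp [PySem.Set.mem_ofList]

theorem pvAch_exists (lst : List Int) (h2 : 2 ≤ lst.length) : ∃ t, pvAch lst t := by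
  match lst, h2 with
  | x :: y :: r, _ =>
    exact ⟨x + y, x, y, rfl, List.Sublist.cons₂ _ (List.Sublist.cons₂ _ (List.nil_sublist r))⟩

-- A returns the maximum of pvF over the achievable sums
theorem pvA_spec (lst : List Int) (h2 : 2 ≤ lst.length) :
    ∃ M, find_max_pair_count lst = M ∧ (∃ t, pvAch lst t ∧ M = pvF t lst) ∧
      (∀ t, pvAch lst t → pvF t lst ≤ M) := by
  simp only [find_max_pair_count]
  set NN : Int := (lst.length : Int) with hNN
  set dictobj : PySem.Dict Int Int :=
    (PySem.List.pyRange 0 NN).foldl (fun d i => d.insert i (PySem.List.pyGetD lst i 0))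
      PySem.Dict.empty with hdict
  have hdictD : ∀ j : Int, 0 ≤ j → j < NN → dictobj.getD j 0 = PySem.List.pyGetD lst j 0 := by
    intro j hj0 hjN
    rw [hdict]
    exact pvGetD_foldl_insert_mem _ _ j _ (PySem.List.mem_pyRange_one.mpr ⟨hj0, hjN⟩)
      (PySem.List.nodup_pyRange_one _ _)
  have hcount : ∀ t, pvCountLoop dictobj NN t (PySem.List.pyRange 0 NN) 0 PySem.Set.empty
      = pvF t lst := by
    intro t
    rw [pvCountLoop_spec lst dictobj NN t hNN hdictD ((NN - 0).toNat) 0 0 PySem.Set.empty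
        (le_refl 0) rfl]
    have hfil : (PySem.List.pyRange 0 NN).filter
        (fun i => decide (i ∉ (PySem.Set.empty : PySem.Set Int))) = PySem.List.pyRange 0 NN := by
      refine List.filter_eq_self.mpr ?_
      intro a _
      simp [PySem.Set.empty]
    have hrem : pvRem lst PySem.Set.empty (PySem.List.pyRange 0 NN) = lst := by
      unfold pvRem
      rw [hfil, hNN, ← PySem.List.len_eq]
      exact PySem.List.map_pyGetD_pyRange_zero lst 0
    rw [hrem, pvGreedy_eq_F, zero_add]
  set sumsA : List Int :=
    (PySem.List.pyRange 0 NN).foldl (fun acc i =>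
      (PySem.List.pyRange (i+1) NN).foldl (fun acc j =>
        if (PySem.List.pyGetD lst i 0 + PySem.List.pyGetD lst j 0) ∈ acc then acc
        else acc ++ [PySem.List.pyGetD lst i 0 + PySem.List.pyGetD lst j 0]) acc) [] with hsA
  have hsumsA_mem : ∀ x, x ∈ sumsA ↔ pvAch lst x := by
    intro x
    rw [hsA, pvMem_outer_fold (fun i j => PySem.List.pyGetD lst i 0 + PySem.List.pyGetD lst j 0)
      (fun i => PySem.List.pyRange (i+1) NN) (PySem.List.pyRange 0 NN) [] x]
    simp only [List.not_mem_nil, false_or]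
    constructor
    · rintro ⟨i, hi, j, hj, rfl⟩
      rw [PySem.List.mem_pyRange_one] at hi hj
      have hi0 : 0 ≤ i := hi.1
      have hj0 : 0 ≤ j := by omega
      have hjN : j < (lst.length : Int) := by rw [← hNN]; exact hj.2
      have hiN : i < (lst.length : Int) := by omega
      have hvi : PySem.List.pyGetD lst i 0 = lst.getD i.toNat 0 := by
        rw [PySem.List.pyGetD_eq_getElem lst 0 hi0 hiN, List.getD_eq_getElem lst 0 (by omega)]
      have hvj : PySem.List.pyGetD lst j 0 = lst.getD j.toNat 0 := by
        rw [PySem.List.pyGetD_eq_getElem lst 0 hj0 hjN, List.getD_eq_getElem lst 0 (by omega)]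
      refine ⟨_, _, rfl, ?_⟩
      rw [hvi, hvj]
      exact pvPair_sublist_of_getD lst i.toNat j.toNat (by omega) (by omega)
    · rintro ⟨a, b, rfl, hsub⟩
      obtain ⟨i, j, hij, hjlen, hgi, hgj⟩ := pvExists_getD_of_pair_sublist lst a b hsub
      refine ⟨(i : Int), ?_, (j : Int), ?_, ?_⟩
      · rw [PySem.List.mem_pyRange_one, hNN]
        constructor
        · positivity
        · omega
      · rw [PySem.List.mem_pyRange_one, hNN]
        constructor
        · omega
        · omega
      · rw [PySem.List.pyGetD_natCast, PySem.List.pyGetD_natCast, hgi, hgj]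
  rw [PySem.List.foldl_append_singleton_eq_map
    (fun t => pvCountLoop dictobj NN t (PySem.List.pyRange 0 NN) 0 PySem.Set.empty)]
  rw [List.nil_append, List.map_congr_left (fun t _ => hcount t)]
  obtain ⟨t0, ht0⟩ := pvAch_exists lst h2
  have ht0s : t0 ∈ PySem.List.sorted sumsA (fun x => x) := by
    rw [PySem.List.mem_sorted]
    exact (hsumsA_mem t0).mpr ht0
  have hne : (PySem.List.sorted sumsA (fun x => x)).map (fun t => pvF t lst) ≠ [] := by
    intro hc
    rw [List.map_eq_nil_iff] at hc
    rw [hc] at ht0s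
    cases ht0s
  obtain ⟨M, hM⟩ : ∃ M, PySem.List.max?
      ((PySem.List.sorted sumsA (fun x => x)).map (fun t => pvF t lst)) (fun x => x) = some M := by
    cases hopt : PySem.List.max?
        ((PySem.List.sorted sumsA (fun x => x)).map (fun t => pvF t lst)) (fun x => x) with
    | none => exact absurd ((PySem.List.max?_eq_none_iff _ _).mp hopt) hne
    | some m => exact ⟨m, rfl⟩
  refine ⟨M, by rw [hM]; rfl, ?_, ?_⟩
  · have hmem := PySem.List.max?_mem hM
    obtain ⟨t, hts, htM⟩ := List.mem_map.mp hmem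
    rw [PySem.List.mem_sorted] at hts
    exact ⟨t, (hsumsA_mem t).mp hts, htM.symm⟩
  · intro t ht
    have : pvF t lst ∈ (PySem.List.sorted sumsA (fun x => x)).map (fun t => pvF t lst) := by
      refine List.mem_map.mpr ⟨t, ?_, rfl⟩
      rw [PySem.List.mem_sorted]
      exact (hsumsA_mem t).mpr ht
    exact PySem.List.max?_isMax hM _ this

-- B returns the maximum of pvF over the achievable sums
theorem pvB_spec (lst : List Int) (h2 : 2 ≤ lst.length) :
    ∃ M, find_max_pair_count_alt lst = M ∧ (∃ t, pvAch lst t ∧ M = pvF t lst) ∧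
      (∀ t, pvAch lst t → pvF t lst ≤ M) := by
  simp only [find_max_pair_count_alt]
  rw [PySem.Dict.foldl_insert_getD_add_one_eq_counter, PySem.Dict.keys_counter]
  set sumsB : PySem.Set Int :=
    (PySem.Set.ofList lst).foldl (fun s a =>
      (PySem.Set.ofList lst).foldl (fun s b =>
        if a < b ∨ (a = b ∧ 1 < (PySem.Dict.counter lst).getD a 0) then PySem.Set.add s (a + b)
        else s) s) PySem.Set.empty with hsB
  have hsumsB_mem : ∀ x, x ∈ sumsB ↔ pvAch lst x := by
    intro x
    rw [hsB, pvMem_set_outer (fun a b => a < b ∨ (a = b ∧ 1 < (PySem.Dict.counter lst).getD a 0))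
      (PySem.Set.ofList lst) (PySem.Set.ofList lst) PySem.Set.empty x]
    have hemp : x ∉ (PySem.Set.empty : PySem.Set Int) := by simp [PySem.Set.empty]
    simp only [hemp, false_or, PySem.Set.mem_ofList, PySem.Dict.getD_counter]
    rw [pvAch_iff_values]
    constructor
    · rintro ⟨a, ha, b, hb, hcond, hsum⟩
      refine ⟨a, ha, b, hb, hsum, ?_⟩
      rcases hcond with h | ⟨rfl, h⟩
      · exact Or.inl h
      · exact Or.inr ⟨rfl, by exact_mod_cast h⟩
    · rintro ⟨a, ha, b, hb, hsum, hcond⟩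
      refine ⟨a, ha, b, hb, ?_, hsum⟩
      rcases hcond with h | ⟨rfl, h⟩
      · exact Or.inl h
      · exact Or.inr ⟨rfl, by exact_mod_cast h⟩
  rw [PySem.List.foldl_congr_mem sumsB _
    (fun best s => if best < pvF s lst then pvF s lst else best) 0 ?_]
  · obtain ⟨h0le, hge⟩ := pvRunMax_ge (fun s => pvF s lst) sumsB 0
    obtain ⟨t0, ht0⟩ := pvAch_exists lst h2
    have ht0B : t0 ∈ sumsB := (hsumsB_mem t0).mpr ht0
    have h1le : 1 ≤ sumsB.foldl (fun best s => if best < pvF s lst then pvF s lst else best) 0 :=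
      le_trans (pvF_pos_of_ach t0 lst ht0) (hge t0 ht0B)
    rcases pvRunMax_mem (fun s => pvF s lst) sumsB 0 with h | ⟨s', hs', h⟩
    · omega
    · refine ⟨_, rfl, ⟨s', (hsumsB_mem s').mp hs', h⟩, ?_⟩
      intro t ht
      exact hge t ((hsumsB_mem t).mpr ht)
  · intro best s hs
    dsimp only
    rw [pvTot_eq lst s]

-- the final assembly
theorem pvPorts_eq (lst : List Int) (h2 : 2 ≤ lst.length) :
    find_max_pair_count lst = find_max_pair_count_alt lst := by
  obtain ⟨MA, hA, ⟨tA, htA, hMA⟩, hmaxA⟩ := pvA_spec lst h2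
  obtain ⟨MB, hB, ⟨tB, htB, hMB⟩, hmaxB⟩ := pvB_spec lst h2
  rw [hA, hB]
  have h1 : MA ≤ MB := hMA ▸ hmaxB tA htA
  have h2' : MB ≤ MA := hMB ▸ hmaxA tB htB
  omega

-- ===== VERDICT (by name: the statement is the Claim_ definition above) =====
theorem find_max_pair_count_spec : Claim_equal_find_max_pair_count := by
  intro lst _ hpre
  unfold Spec_find_max_pair_count
  exact pvPorts_eq lst hpre
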